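-- pv_equiv track=rewrite | github.com/abc1203/leetcode-solutions | LeetCode/Medium/2021. Brightest Position on Street.py | brightestPosition
-- ===== SOURCE A (Python) =====
-- from typing import List
--
-- def brightestPosition(lights: List[List[int]]) -> int:
--     brightness = {}
--
--     for pos, ran in lights:
--         l, r = pos - ran, pos + ran
--         brightness[l] = brightness.get(l, 0) + 1
--         brightness[r+1] = brightness.get(r+1, 0) - 1
--
--     ans, curr_max, curr_brightness = -1, 0, 0
--     for idx, val in sorted(brightness.items()):
--         curr_brightness += val
--         if curr_brightness > curr_max:
--             curr_max = curr_brightness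
--             ans = idx
--     return ans
-- ===== SOURCE B (Python) =====
-- from typing import List
--
-- def brightestPosition(lights: List[List[int]]) -> int:
--     starts = sorted(pos - ran for pos, ran in lights)
--     ends = sorted(pos + ran + 1 for pos, ran in lights)
--     n = len(lights)
--     i = j = 0
--     ans, best, cur = -1, 0, 0
--     while i < n or j < n:
--         if i < n and (j >= n or starts[i] <= ends[j]):
--             c = starts[i]
--         else:
--             c = ends[j]
--         while i < n and starts[i] == c:
--             cur += 1
--             i += 1
--         while j < n and ends[j] == c:
--             cur -= 1
--             j += 1
--         if cur > best:
--             best, ans = cur, c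
--     return ans
-- ===== Notes on version B (the rewrite author's own statement) =====
-- stated objective: alternative
-- what changed: Replaces A's difference-dict (hash map of +1/-1 deltas, then sorted(items) sweep) by a two-pointer merge of two separately sorted lists of start and end coordinates, batch-consuming all events at each coordinate; no dict is built at all.
import Mathlib
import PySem

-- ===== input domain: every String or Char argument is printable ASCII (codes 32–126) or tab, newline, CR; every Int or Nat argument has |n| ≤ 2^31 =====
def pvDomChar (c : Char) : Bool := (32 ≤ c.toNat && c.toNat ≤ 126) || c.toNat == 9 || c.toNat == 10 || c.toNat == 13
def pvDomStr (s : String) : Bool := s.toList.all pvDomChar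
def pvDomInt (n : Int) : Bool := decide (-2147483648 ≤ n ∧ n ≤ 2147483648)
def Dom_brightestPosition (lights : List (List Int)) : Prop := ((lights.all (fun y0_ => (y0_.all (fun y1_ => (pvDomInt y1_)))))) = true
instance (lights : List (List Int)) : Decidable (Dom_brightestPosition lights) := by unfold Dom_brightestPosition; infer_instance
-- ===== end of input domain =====

-- B replaces A's difference-dict + sorted(items) sweep by a two-pointer merge of two sorted
-- event-coordinate lists (same O(n log n) cost, no dict); equal return value on Pre_.

-- ===== PORT A =====
def brightestPosition (lights : List (List Int)) : Int :=
  let brightness := lights.foldl (fun d light =>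
    match light with
    | [pos, ran] =>
      let l := pos - ran
      let r := pos + ran
      let d := d.insert l (d.getD l 0 + 1)
      d.insert (r + 1) (d.getD (r + 1) 0 - 1)
    | _ => d) (PySem.Dict.empty : PySem.Dict Int Int)
  let st := (PySem.List.sorted2 brightness.items (fun p => p.1) (fun p => p.2)).foldl
    (fun (s : Int × Int × Int) p =>
      let curr := s.2.2 + p.2
      if curr > s.2.1 then (p.1, curr, curr) else (s.1, s.2.1, curr)) (-1, 0, 0)
  st.1

-- ===== PORT B =====
-- Source B's tuple unpacking `pos, ran` in the two generator expressions (exact on the length-2 inner lists Pre_ admits)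
def bpStart (light : List Int) : Int := light.headD 0 - light.tail.headD 0
def bpEnd (light : List Int) : Int := light.headD 0 + light.tail.headD 0 + 1

-- the coordinate Source B picks at each turn of its outer while loop (min of the available heads)
def bpHead : List Int → List Int → Int
  | s :: _, e :: _ => min s e
  | s :: _, [] => s
  | [], e :: _ => e
  | [], [] => 0

-- termination of the outer while loop: each turn consumes at least one event
theorem bpSweep_dec (ss es : List Int) (h : ¬(ss = [] ∧ es = [])) :
    (ss.dropWhile (· == bpHead ss es)).length + (es.dropWhile (· == bpHead ss es)).length
      < ss.length + es.length := by
  have hd : ∀ (c : Int) (t : List Int), ((c :: t).dropWhile (· == c)).length < (c :: t).length := by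
    intro c t
    simp only [List.dropWhile, beq_self_eq_true, List.length_cons]
    exact Nat.lt_succ_of_le (List.length_dropWhile_le _ _)
  rcases ss with _ | ⟨s, ts⟩ <;> rcases es with _ | ⟨e, te⟩
  · exact absurd ⟨rfl, rfl⟩ h
  · have h1 := List.length_dropWhile_le (fun x => x == bpHead ([] : List Int) (e :: te)) ([] : List Int)
    have h2 := hd e te
    simp only [bpHead] at *
    omega
  · have h2 := List.length_dropWhile_le (fun x => x == bpHead (s :: ts) ([] : List Int)) ([] : List Int)
    have h1 := hd s ts
    simp only [bpHead] at *
    omega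
  · rcases le_total s e with hle | hle
    · have hmin : bpHead (s :: ts) (e :: te) = s := by simp [bpHead, min_eq_left hle]
      rw [hmin]
      have h1 := hd s ts
      have h2 := List.length_dropWhile_le (fun x => x == s) (e :: te)
      omega
    · have hmin : bpHead (s :: ts) (e :: te) = e := by simp [bpHead, min_eq_right hle]
      rw [hmin]
      have h2 := hd e te
      have h1 := List.length_dropWhile_le (fun x => x == e) (s :: ts)
      omega

-- the two inner `while` loops of Source B count and drop the prefix of events equal to c
def bpSweep (ss es : List Int) (ans best cur : Int) : Int :=
  if h : ss = [] ∧ es = [] then ans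
  else
    let c := bpHead ss es
    let ss' := ss.dropWhile (· == c)
    let es' := es.dropWhile (· == c)
    let cur' := cur + ((ss.takeWhile (· == c)).length : Int) - ((es.takeWhile (· == c)).length : Int)
    if cur' > best then bpSweep ss' es' c cur' cur' else bpSweep ss' es' ans best cur'
termination_by ss.length + es.length
decreasing_by
  · exact bpSweep_dec ss es h
  · exact bpSweep_dec ss es h

def brightestPosition_alt (lights : List (List Int)) : Int :=
  let starts := PySem.List.sorted (lights.map bpStart) (fun x => x)
  let ends := PySem.List.sorted (lights.map bpEnd) (fun x => x)
  bpSweep starts ends (-1) 0 0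

-- ===== PRECONDITION & SPEC =====
-- Pre_ excludes inner lists whose length is not 2: Python's `for pos, ran in lights` raises
-- ValueError/TypeError there (both A and B raise).
def Pre_brightestPosition (lights : List (List Int)) : Prop := ∀ l ∈ lights, l.length = 2
instance (lights : List (List Int)) : Decidable (Pre_brightestPosition lights) := by
  unfold Pre_brightestPosition; infer_instance
def pvWitness_brightestPosition : List (List Int) := [[0, 2], [3, 1], [-2, 0]]

def Spec_brightestPosition (lights : List (List Int)) (out : Int) : Prop := out = brightestPosition_alt lights
instance (lights : List (List Int)) (out : Int) : Decidable (Spec_brightestPosition lights out) := by unfold Spec_brightestPosition; infer_instance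

-- ===== CLAIM (what is proved, stated in full; the proofs are below) =====
def Claim_equal_brightestPosition : Prop := ∀ (lights : List (List Int)), Dom_brightestPosition lights → Pre_brightestPosition lights → Spec_brightestPosition lights (brightestPosition lights)

-- ===== LEMMAS AND PROOFS =====

-- per-light event list of A's dict loop: (start, +1), (end+1, -1)
def pvEvts (light : List Int) : List (Int × Int) :=
  match light with
  | [p, r] => [(p - r, 1), (p + r + 1, -1)]
  | _ => []


def pvMStep (d : PySem.Dict Int Int) (p : Int × Int) : PySem.Dict Int Int := d.modify p.1 0 (· + p.2)

-- the common per-coordinate sweep step, parametrised by the net delta at each coordinate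
def pvAgg (cnt : Int → Int) (s : Int × Int × Int) (c : Int) : Int × Int × Int :=
  if s.2.2 + cnt c > s.2.1 then (c, s.2.2 + cnt c, s.2.2 + cnt c) else (s.1, s.2.1, s.2.2 + cnt c)

theorem foldA_eq (lights : List (List Int)) : ∀ d : PySem.Dict Int Int,
    lights.foldl (fun d light =>
      match light with
      | [pos, ran] =>
        let l := pos - ran
        let r := pos + ran
        let d := d.insert l (d.getD l 0 + 1)
        d.insert (r + 1) (d.getD (r + 1) 0 - 1)
      | _ => d) d = (lights.flatMap pvEvts).foldl pvMStep d := by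
  induction lights with
  | nil => intro d; rfl
  | cons l ls ih =>
    intro d
    rw [List.foldl_cons, List.flatMap_cons, List.foldl_append, ih]
    congr 1
    rcases l with _ | ⟨p, t⟩
    · rfl
    rcases t with _ | ⟨r, t2⟩
    · rfl
    rcases t2 with _ | ⟨z, t3⟩
    · simp only [pvEvts, List.foldl_cons, List.foldl_nil, pvMStep, PySem.Dict.modify]
      norm_num [sub_eq_add_neg]
    · rfl

theorem getD_mfold : ∀ (es : List (Int × Int)) (d : PySem.Dict Int Int) (k : Int),
    (es.foldl pvMStep d).getD k 0
      = d.getD k 0 + ((es.filter (fun p => p.1 == k)).map (·.2)).sum := by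
  intro es
  induction es with
  | nil => intro d k; simp
  | cons p t ih =>
    intro d k
    rw [List.foldl_cons, ih]
    have hm : (pvMStep d p).getD k 0 = if k = p.1 then d.getD p.1 0 + p.2 else d.getD k 0 :=
      PySem.Dict.getD_modify d p.1 k 0 (· + p.2)
    by_cases hk : p.1 = k
    · rw [List.filter_cons_of_pos (by simp [hk])]
      rw [hm]
      simp [hk.symm]
      omega
    · rw [List.filter_cons_of_neg (by simp [hk])]
      rw [hm, if_neg (fun hh => hk hh.symm)]

theorem keys_mfold (es : List (Int × Int)) :
    (es.foldl pvMStep PySem.Dict.empty).keys = PySem.Set.ofList (es.map (·.1)) := by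
  have h := PySem.Dict.keys_foldl_modify_key es (fun p => p.1) 0
      (fun _ p => (· + p.2)) PySem.Dict.empty
  simpa [pvMStep, PySem.Dict.empty, PySem.Set.update, PySem.Set.ofList] using h

theorem nodup_keys_mfold (es : List (Int × Int)) :
    (es.foldl pvMStep PySem.Dict.empty).keys.Nodup := by
  have h := PySem.Dict.nodup_keys_foldl_modify_key es (fun p => p.1) 0
      (fun _ p => (· + p.2)) PySem.Dict.empty (by simp [PySem.Dict.empty, PySem.Dict.keys])
  simpa [pvMStep] using h

theorem find?_of_nodup : ∀ (l : List (Int × Int)), (l.map (·.1)).Nodup →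
    ∀ p ∈ l, l.find? (fun q => q.1 == p.1) = some p := by
  intro l
  induction l with
  | nil => intro h p hp; simp at hp
  | cons q t ih =>
    intro h p hp
    rcases List.mem_cons.mp hp with rfl | hpt
    · simp [List.find?]
    · have hq : q.1 ≠ p.1 := by
        simp only [List.map_cons, List.nodup_cons] at h
        intro he
        exact h.1 (he ▸ List.mem_map_of_mem hpt)
      rw [List.find?_cons_of_neg (by simpa using hq)]
      exact ih (by
        simp only [List.map_cons, List.nodup_cons] at h
        exact h.2) p hpt

theorem items_eq (d : PySem.Dict Int Int) (h : d.keys.Nodup) :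
    d.items = d.keys.map (fun k => (k, d.getD k 0)) := by
  have hkeys : d.keys = d.items.map (fun p => p.1) := rfl
  rw [hkeys, List.map_map]
  have hpt : ∀ p ∈ d.items, d.getD p.1 0 = p.2 := by
    intro p hp
    have := find?_of_nodup d.items (by rw [hkeys] at h; exact h) p hp
    simp [PySem.Dict.getD, PySem.Dict.get?, this]
  conv_lhs => rw [← List.map_id d.items]
  exact (List.map_congr_left (fun p hp => by simp [Function.comp, hpt p hp])).symm

theorem insertBy_congr {α : Type} (f g : α → α → Bool) (x : α) : ∀ ys : List α,
    (∀ y ∈ ys, f x y = g x y) →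
    PySem.List.insertBy f x ys = PySem.List.insertBy g x ys := by
  intro ys
  induction ys with
  | nil => intro _; rfl
  | cons y t ih =>
    intro h
    have hy := h y (List.mem_cons_self)
    simp only [PySem.List.insertBy, hy]
    by_cases hg : g x y
    · simp [hg]
    · simp [hg, ih (fun z hz => h z (List.mem_cons_of_mem _ hz))]

theorem foldl_insertBy_congr {α : Type} (f g : α → α → Bool) (S : List α)
    (h : ∀ a ∈ S, ∀ b ∈ S, f a b = g a b) :
    ∀ (l acc : List α), (∀ x ∈ l, x ∈ S) → (∀ x ∈ acc, x ∈ S) →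
    l.foldl (fun acc x => PySem.List.insertBy f x acc) acc
      = l.foldl (fun acc x => PySem.List.insertBy g x acc) acc := by
  intro l
  induction l with
  | nil => intro acc _ _; rfl
  | cons x t ih =>
    intro acc hl hacc
    have hx : x ∈ S := hl x List.mem_cons_self
    rw [List.foldl_cons, List.foldl_cons,
      insertBy_congr f g x acc (fun y hy => h x hx y (hacc y hy))]
    exact ih _ (fun z hz => hl z (List.mem_cons_of_mem _ hz))
      (fun z hz => by
        rcases (PySem.List.mem_insertBy g x z acc).mp hz with rfl | hz'
        · exact hx
        · exact hacc z hz')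

theorem sorted2_eq_sorted_fst (l : List (Int × Int)) (h : (l.map (·.1)).Nodup) :
    PySem.List.sorted2 l (fun p => p.1) (fun p => p.2)
      = PySem.List.sorted l (fun p => p.1) := by
  have e2 : PySem.List.sorted2 l (fun p => p.1) (fun p => p.2)
      = l.foldl (fun acc x => PySem.List.insertBy
          (fun a b : Int × Int => decide (a.1 < b.1) || (!decide (b.1 < a.1) && decide (a.2 < b.2))) x acc) [] := rfl
  have e1 : PySem.List.sorted l (fun p => p.1)
      = l.foldl (fun acc x => PySem.List.insertBy
          (fun a b : Int × Int => decide (a.1 < b.1)) x acc) [] := rfl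
  rw [e2, e1]
  refine foldl_insertBy_congr _ _ l ?_ l [] (fun x hx => hx) (by simp)
  intro a ha b hb
  by_cases he : a.1 = b.1
  · have hab : a = b := List.inj_on_of_nodup_map h ha hb he
    subst hab
    simp
  · rcases lt_or_gt_of_ne he with hlt | hgt
    · simp [hlt]
    · simp [hgt, lt_asymm hgt]

-- characterisation of a sorted list split at its minimum value c
theorem sorted_split (c : Int) : ∀ ss : List Int,
    ss.Pairwise (· ≤ ·) → (∀ x ∈ ss, c ≤ x) →
    (ss.takeWhile (· == c)).length = ss.count c
    ∧ (∀ x ∈ ss.dropWhile (· == c), c < x)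
    ∧ ∀ k, k ≠ c → (ss.dropWhile (· == c)).count k = ss.count k := by
  intro ss
  induction ss with
  | nil => intro _ _; refine ⟨by simp, by simp, fun k _ => rfl⟩
  | cons x t ih =>
    intro hp hc
    have hpt : t.Pairwise (· ≤ ·) := hp.of_cons
    have hxt : ∀ y ∈ t, x ≤ y := fun y hy => List.rel_of_pairwise_cons hp hy
    by_cases hx : x = c
    · subst hx
      have hct : ∀ y ∈ t, x ≤ y := hxt
      obtain ⟨h1, h2, h3⟩ := ih hpt hct
      refine ⟨?_, ?_, ?_⟩
      · rw [List.takeWhile_cons_of_pos (by simp)]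
        simp [h1]
      · simpa [List.dropWhile] using h2
      · intro k hk
        simp only [List.dropWhile, beq_self_eq_true]
        rw [h3 k hk, List.count_cons]
        simp [Ne.symm hk]
    · have hcx : c < x := lt_of_le_of_ne (hc x List.mem_cons_self) (fun hh => hx hh.symm)
      have hgt : ∀ y ∈ x :: t, c < y := by
        intro y hy
        rcases List.mem_cons.mp hy with rfl | hyt
        · exact hcx
        · exact lt_of_lt_of_le hcx (hxt y hyt)
      have hnm : c ∉ x :: t := fun hm => lt_irrefl c (hgt c hm)
      refine ⟨?_, ?_, ?_⟩
      · rw [List.takeWhile_cons_of_neg (by simpa using hx), List.count_eq_zero.mpr hnm]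
        rfl
      · rw [List.dropWhile_cons_of_neg (by simpa using hx)]
        exact hgt
      · intro k _
        rw [List.dropWhile_cons_of_neg (by simpa using hx)]

theorem sortedSet_cons (c : Int) (xs ys : List Int)
    (hmem : c ∈ xs) (hiff : ∀ x, x ∈ xs ↔ x = c ∨ x ∈ ys) (hgt : ∀ x ∈ ys, c < x) :
    PySem.List.sorted (PySem.Set.ofList xs) (fun x => x)
      = c :: PySem.List.sorted (PySem.Set.ofList ys) (fun x => x) := by
  apply PySem.List.sorted_eq_of_perm_of_pairwise_lt
  · -- permutation
    have hys : (PySem.List.sorted (PySem.Set.ofList ys) (fun x => x)).Nodup :=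
      ((PySem.List.sorted_perm (PySem.Set.ofList ys) (fun x => x) false).nodup_iff).mpr
        (PySem.Set.nodup_ofList ys)
    have hcny : c ∉ PySem.List.sorted (PySem.Set.ofList ys) (fun x => x) := by
      intro hm
      have : c ∈ ys := (PySem.Set.mem_ofList ys c).mp
        ((PySem.List.mem_sorted _ _ _ _).mp hm)
      exact lt_irrefl c (hgt c this)
    refine (List.perm_ext_iff_of_nodup (by exact List.nodup_cons.mpr ⟨hcny, hys⟩)
      (PySem.Set.nodup_ofList xs)).mpr ?_
    intro a
    simp only [List.mem_cons, PySem.List.mem_sorted, PySem.Set.mem_ofList]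
    exact (or_congr Iff.rfl Iff.rfl).trans (hiff a).symm
  · refine List.pairwise_cons.mpr ⟨?_, ?_⟩
    · intro a ha
      exact hgt a ((PySem.Set.mem_ofList ys a).mp ((PySem.List.mem_sorted _ _ _ _).mp ha))
    · exact PySem.List.sorted_ofList_pairwise_lt ys

theorem bpHead_mem (ss es : List Int) (h : ¬(ss = [] ∧ es = [])) :
    bpHead ss es ∈ ss ++ es := by
  rcases ss with _ | ⟨s, ts⟩ <;> rcases es with _ | ⟨e, te⟩
  · exact absurd ⟨rfl, rfl⟩ h
  · simp [bpHead]
  · simp [bpHead]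
  · rcases le_total s e with hle | hle
    · simp [bpHead, min_eq_left hle]
    · simp [bpHead, min_eq_right hle]

theorem bpHead_le (ss es : List Int) (hss : ss.Pairwise (· ≤ ·)) (hes : es.Pairwise (· ≤ ·)) :
    ∀ x ∈ ss ++ es, bpHead ss es ≤ x := by
  intro x hx
  rcases ss with _ | ⟨s, ts⟩ <;> rcases es with _ | ⟨e, te⟩
  · simp at hx
  · simp only [List.nil_append] at hx
    rcases List.mem_cons.mp hx with rfl | hxt
    · simp [bpHead]
    · exact le_trans (by simp [bpHead]) (List.rel_of_pairwise_cons hes hxt)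
  · simp only [List.append_nil] at hx
    rcases List.mem_cons.mp hx with rfl | hxt
    · simp [bpHead]
    · exact le_trans (by simp [bpHead]) (List.rel_of_pairwise_cons hss hxt)
  · have hs : bpHead (s :: ts) (e :: te) ≤ s := by simp [bpHead]
    have he : bpHead (s :: ts) (e :: te) ≤ e := by simp [bpHead]
    rcases List.mem_append.mp hx with hm | hm
    · rcases List.mem_cons.mp hm with rfl | hxt
      · exact hs
      · exact le_trans hs (List.rel_of_pairwise_cons hss hxt)
    · rcases List.mem_cons.mp hm with rfl | hxt
      · exact he
      · exact le_trans he (List.rel_of_pairwise_cons hes hxt)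

theorem bpSweep_eq : ∀ (n : Nat) (ss es : List Int), ss.length + es.length ≤ n →
    ss.Pairwise (· ≤ ·) → es.Pairwise (· ≤ ·) → ∀ ans best cur : Int,
    bpSweep ss es ans best cur =
      ((PySem.List.sorted (PySem.Set.ofList (ss ++ es)) (fun x => x)).foldl
        (pvAgg (fun c => (ss.count c : Int) - (es.count c : Int))) (ans, best, cur)).1 := by
  intro n
  induction n with
  | zero =>
    intro ss es hlen hss hes ans best cur
    have h1 : ss = [] := List.eq_nil_of_length_eq_zero (by omega)
    have h2 : es = [] := List.eq_nil_of_length_eq_zero (by omega)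
    subst h1; subst h2
    rw [bpSweep]
    rfl
  | succ n ih =>
    intro ss es hlen hss hes ans best cur
    by_cases hne : ss = [] ∧ es = []
    · obtain ⟨rfl, rfl⟩ := hne
      rw [bpSweep]
      rfl
    · have hmem := bpHead_mem ss es hne
      have hle := bpHead_le ss es hss hes
      set c := bpHead ss es with hc
      obtain ⟨hs1, hs2, hs3⟩ :=
        sorted_split c ss hss (fun x hx => hle x (List.mem_append.mpr (Or.inl hx)))
      obtain ⟨he1, he2, he3⟩ :=
        sorted_split c es hes (fun x hx => hle x (List.mem_append.mpr (Or.inr hx)))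
      have hKS : PySem.List.sorted (PySem.Set.ofList (ss ++ es)) (fun x => x)
          = c :: PySem.List.sorted
              (PySem.Set.ofList (ss.dropWhile (· == c) ++ es.dropWhile (· == c))) (fun x => x) := by
        apply sortedSet_cons c _ _ hmem
        · intro x
          constructor
          · intro hx
            by_cases hxc : x = c
            · exact Or.inl hxc
            · refine Or.inr ?_
              rcases List.mem_append.mp hx with hm | hm
              · rw [← List.takeWhile_append_dropWhile (p := (· == c)) (l := ss)] at hm
                rcases List.mem_append.mp hm with hm2 | hm2
                · exact absurd (by simpa using List.mem_takeWhile_imp hm2) hxc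
                · exact List.mem_append.mpr (Or.inl hm2)
              · rw [← List.takeWhile_append_dropWhile (p := (· == c)) (l := es)] at hm
                rcases List.mem_append.mp hm with hm2 | hm2
                · exact absurd (by simpa using List.mem_takeWhile_imp hm2) hxc
                · exact List.mem_append.mpr (Or.inr hm2)
          · rintro (rfl | hx)
            · exact hmem
            · rcases List.mem_append.mp hx with hm | hm
              · exact List.mem_append.mpr (Or.inl ((List.dropWhile_sublist _).subset hm))
              · exact List.mem_append.mpr (Or.inr ((List.dropWhile_sublist _).subset hm))
        · intro x hx
          rcases List.mem_append.mp hx with hm | hm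
          · exact hs2 x hm
          · exact he2 x hm
      have hdec := bpSweep_dec ss es hne
      have hlen' : (ss.dropWhile (· == c)).length + (es.dropWhile (· == c)).length ≤ n := by
        rw [hc]; omega
      have hss' : (ss.dropWhile (· == c)).Pairwise (· ≤ ·) := hss.sublist (List.dropWhile_sublist _)
      have hes' : (es.dropWhile (· == c)).Pairwise (· ≤ ·) := hes.sublist (List.dropWhile_sublist _)
      have hgtKS : ∀ x ∈ PySem.List.sorted
          (PySem.Set.ofList (ss.dropWhile (· == c) ++ es.dropWhile (· == c))) (fun x => x),
          x ≠ c := by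
        intro x hx
        have hxm : x ∈ ss.dropWhile (· == c) ++ es.dropWhile (· == c) :=
          (PySem.Set.mem_ofList _ x).mp ((PySem.List.mem_sorted _ _ _ _).mp hx)
        rcases List.mem_append.mp hxm with hm | hm
        · exact ne_of_gt (hs2 x hm)
        · exact ne_of_gt (he2 x hm)
      have hfold : ∀ st : Int × Int × Int,
          (PySem.List.sorted
            (PySem.Set.ofList (ss.dropWhile (· == c) ++ es.dropWhile (· == c))) (fun x => x)).foldl
            (pvAgg (fun c0 => ((ss.dropWhile (· == c)).count c0 : Int)
              - ((es.dropWhile (· == c)).count c0 : Int))) st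
          = (PySem.List.sorted
            (PySem.Set.ofList (ss.dropWhile (· == c) ++ es.dropWhile (· == c))) (fun x => x)).foldl
            (pvAgg (fun c0 => (ss.count c0 : Int) - (es.count c0 : Int))) st := by
        intro st
        apply PySem.List.foldl_congr_mem
        intro acc x hx
        have hxc := hgtKS x hx
        simp only [pvAgg, hs3 x hxc, he3 x hxc]
      have hcur : cur + ((ss.takeWhile (· == c)).length : Int) - ((es.takeWhile (· == c)).length : Int)
          = cur + (((ss.count c : Nat) : Int) - ((es.count c : Nat) : Int)) := by
        rw [← hs1, ← he1]; omega
      rw [bpSweep, dif_neg hne, ← hc, hKS, List.foldl_cons]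
      simp only [hcur]
      by_cases hgt : cur + ((ss.count c : Int) - (es.count c : Int)) > best
      · rw [if_pos hgt]
        rw [ih _ _ hlen' hss' hes' c _ _]
        rw [hfold]
        congr 1
        simp only [pvAgg]
        rw [if_pos (by exact hgt)]
      · rw [if_neg hgt]
        rw [ih _ _ hlen' hss' hes' ans best _]
        rw [hfold]
        congr 1
        simp only [pvAgg]
        rw [if_neg (by exact hgt)]

theorem delta_eq (lights : List (List Int)) (h : ∀ l ∈ lights, l.length = 2) (k : Int) :
    (((lights.flatMap pvEvts).filter (fun p => p.1 == k)).map (·.2)).sum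
      = ((lights.map bpStart).count k : Int) - ((lights.map bpEnd).count k : Int) := by
  induction lights with
  | nil => simp
  | cons l ls ih =>
    have hl2 : l.length = 2 := h l List.mem_cons_self
    have ihs := ih (fun y hy => h y (List.mem_cons_of_mem _ hy))
    rcases l with _ | ⟨p, t⟩; · simp at hl2
    rcases t with _ | ⟨r, t2⟩; · simp at hl2
    rcases t2 with _ | ⟨z, t3⟩
    swap; · simp at hl2
    rw [List.flatMap_cons, List.filter_append, List.map_append, List.sum_append, ihs]
    have hev : ((([(p - r, 1), (p + r + 1, -1)] : List (Int × Int)).filter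
        (fun q => q.1 == k)).map (·.2)).sum
        = (if p - r = k then (1 : Int) else 0) + (if p + r + 1 = k then (-1 : Int) else 0) := by
      by_cases h1 : p - r = k <;> by_cases h2 : p + r + 1 = k <;>
        simp [beq_iff_eq, h1, h2]
    rw [show pvEvts [p, r] = [(p - r, 1), (p + r + 1, -1)] from rfl, hev]
    simp only [List.map_cons, List.count_cons, show bpStart [p, r] = p - r from rfl,
      show bpEnd [p, r] = p + r + 1 from rfl, beq_iff_eq]
    by_cases h1 : p - r = k <;> by_cases h2 : p + r + 1 = k <;>
      simp [h1, h2] <;> omega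

theorem coords_mem (lights : List (List Int)) (h : ∀ l ∈ lights, l.length = 2) (x : Int) :
    x ∈ (lights.flatMap pvEvts).map (·.1)
      ↔ x ∈ lights.map bpStart ∨ x ∈ lights.map bpEnd := by
  induction lights with
  | nil => simp
  | cons l ls ih =>
    have hl2 : l.length = 2 := h l List.mem_cons_self
    have ihs := ih (fun y hy => h y (List.mem_cons_of_mem _ hy))
    rcases l with _ | ⟨p, t⟩; · simp at hl2
    rcases t with _ | ⟨r, t2⟩; · simp at hl2
    rcases t2 with _ | ⟨z, t3⟩
    swap; · simp at hl2
    simp only [List.flatMap_cons, show pvEvts [p, r] = [(p - r, 1), (p + r + 1, -1)] from rfl,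
      List.map_append, List.map_cons, List.map_nil, List.mem_append, List.mem_cons,
      List.not_mem_nil, or_false, show bpStart [p, r] = p - r from rfl,
      show bpEnd [p, r] = p + r + 1 from rfl, ihs]
    tauto

-- ===== VERDICT (by name: the statement is the Claim_ definition above) =====
theorem brightestPosition_spec : Claim_equal_brightestPosition := by
  intro lights _hdom hpre
  unfold Spec_brightestPosition
  -- zeta-reduced (definitionally equal) readings of the two ports
  have hA0 : brightestPosition lights
      = ((PySem.List.sorted2 ((lights.flatMap pvEvts).foldl pvMStep
            (PySem.Dict.empty : PySem.Dict Int Int)).items (fun p => p.1) (fun p => p.2)).foldl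
          (fun (s : Int × Int × Int) p =>
            if s.2.2 + p.2 > s.2.1 then (p.1, s.2.2 + p.2, s.2.2 + p.2)
            else (s.1, s.2.1, s.2.2 + p.2)) (-1, 0, 0)).1 := by
    rw [show (lights.flatMap pvEvts).foldl pvMStep (PySem.Dict.empty : PySem.Dict Int Int)
        = lights.foldl (fun d light =>
            match light with
            | [pos, ran] =>
              let l := pos - ran
              let r := pos + ran
              let d := d.insert l (d.getD l 0 + 1)
              d.insert (r + 1) (d.getD (r + 1) 0 - 1)
            | _ => d) (PySem.Dict.empty : PySem.Dict Int Int) from (foldA_eq lights _).symm]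
    rfl
  have hB0 : brightestPosition_alt lights
      = bpSweep (PySem.List.sorted (lights.map bpStart) (fun x => x))
          (PySem.List.sorted (lights.map bpEnd) (fun x => x)) (-1) 0 0 := rfl
  rw [hA0, hB0]
  set EV := lights.flatMap pvEvts with hEV
  set S := lights.map bpStart with hS
  set E := lights.map bpEnd with hE
  set d := EV.foldl pvMStep (PySem.Dict.empty : PySem.Dict Int Int) with hd
  have hnd : d.keys.Nodup := nodup_keys_mfold EV
  have hndf : (d.items.map (fun p => p.1)).Nodup := hnd
  have hitems : d.items = d.keys.map (fun k => (k, d.getD k 0)) := items_eq d hnd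
  have hgetD : ∀ k : Int, d.getD k 0 = (S.count k : Int) - (E.count k : Int) := by
    intro k
    rw [hd, getD_mfold]
    have h0 : (PySem.Dict.empty : PySem.Dict Int Int).getD k 0 = 0 := rfl
    rw [h0, zero_add]
    exact delta_eq lights hpre k
  have hsorted : PySem.List.sorted d.items (fun p => p.1)
      = (PySem.List.sorted (PySem.Set.ofList (EV.map (·.1))) (fun x => x)).map
          (fun k => (k, d.getD k 0)) := by
    apply PySem.List.sorted_eq_of_perm_of_pairwise_lt
    · have hperm : (PySem.List.sorted (PySem.Set.ofList (EV.map (·.1))) (fun x => x)).Perm d.keys := by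
        rw [hd, keys_mfold]
        exact PySem.List.sorted_perm _ _ _
      have := hperm.map (fun k => (k, d.getD k 0))
      rw [← hitems] at this
      exact this
    · have hpw := PySem.List.sorted_ofList_pairwise_lt (EV.map (·.1))
      exact List.pairwise_map.mpr (by simpa using hpw)
  rw [sorted2_eq_sorted_fst d.items hndf, hsorted, List.foldl_map]
  -- B side
  have hpwS := PySem.List.sorted_pairwise S (fun x => x)
  have hpwE := PySem.List.sorted_pairwise E (fun x => x)
  rw [bpSweep_eq ((PySem.List.sorted S (fun x => x)).length + (PySem.List.sorted E (fun x => x)).length)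
      _ _ le_rfl (by simpa using hpwS) (by simpa using hpwE)]
  -- same coordinate list
  have hKS : PySem.List.sorted
      (PySem.Set.ofList (PySem.List.sorted S (fun x => x) ++ PySem.List.sorted E (fun x => x)))
      (fun x => x) = PySem.List.sorted (PySem.Set.ofList (EV.map (·.1))) (fun x => x) := by
    apply PySem.List.sorted_eq_sorted_of_perm _ _ _ (fun a b h => h)
    refine (List.perm_ext_iff_of_nodup (PySem.Set.nodup_ofList _) (PySem.Set.nodup_ofList _)).mpr ?_
    intro a
    rw [PySem.Set.mem_ofList, PySem.Set.mem_ofList]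
    rw [List.mem_append, PySem.List.mem_sorted, PySem.List.mem_sorted]
    exact (coords_mem lights hpre a).symm
  rw [hKS]
  -- same step function
  have hcnt : ∀ k : Int, ((PySem.List.sorted S (fun x => x)).count k : Int)
      - ((PySem.List.sorted E (fun x => x)).count k : Int)
      = (S.count k : Int) - (E.count k : Int) := by
    intro k
    rw [(PySem.List.sorted_perm S (fun x => x) false).count_eq,
      (PySem.List.sorted_perm E (fun x => x) false).count_eq]
  have hstepeq : (fun (s : Int × Int × Int) (k : Int) =>
        if s.2.2 + (k, d.getD k 0).2 > s.2.1
        then ((k, d.getD k 0).1, s.2.2 + (k, d.getD k 0).2, s.2.2 + (k, d.getD k 0).2)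
        else (s.1, s.2.1, s.2.2 + (k, d.getD k 0).2))
      = pvAgg (fun c => ((PySem.List.sorted S (fun x => x)).count c : Int)
          - ((PySem.List.sorted E (fun x => x)).count c : Int)) := by
    funext s k
    simp only [pvAgg, hgetD k, hcnt k]
  rw [← hstepeq]
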